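-- pv_equiv track=rewrite | github.com/Ryan-Hu-Hu-Hu/De_novo_generation_platform | pipeline/active_site.py | residues_to_contig
-- ===== SOURCE A (Python) =====
-- from typing import List, Tuple
--
-- def residues_to_contig(
--     fixed_residues: List[int],
--     total_length: int,
--     chain: str = "A",
-- ) -> str:
--     """
--     Convert a list of fixed residue numbers to an RFdiffusion contig string.
--
--     Example: fixed=[5,6,7,20], total=100 →
--       '[1-4/A5-7/8-19/A20/21-100]'
--
--     The returned string is the value for `contigmap.contigs`, already
--     wrapped in square brackets.
--     """
--     if not fixed_residues:
--         return f"[{total_length}-{total_length}]"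
--
--     fixed_set = set(fixed_residues)
--     segments: List[str] = []
--     i = 1
--     while i <= total_length:
--         if i in fixed_set:
--             # Extend to the end of the contiguous run of fixed residues
--             j = i
--             while j + 1 <= total_length and j + 1 in fixed_set:
--                 j += 1
--             segments.append(f"{chain}{i}-{j}")
--             i = j + 1
--         else:
--             # Extend the free (diffused) segment
--             j = i
--             while j + 1 <= total_length and j + 1 not in fixed_set:
--                 j += 1
--             segments.append(f"{j - i + 1}-{j - i + 1}")
--             i = j + 1
--
--     return "[" + "/".join(segments) + "]"
-- ===== SOURCE B (Python) =====
-- def residues_to_contig(fixed_residues, total_length, chain="A"):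
--     if not fixed_residues:
--         return f"[{total_length}-{total_length}]"
--     rs = sorted({r for r in fixed_residues if 1 <= r <= total_length})
--     segments = []
--     prev = 0            # last position already covered by an emitted segment
--     start = end = None  # current run of consecutive fixed residues
--     for r in rs:
--         if end is not None and r == end + 1:
--             end = r
--         else:
--             if end is not None:
--                 if start > prev + 1:
--                     g = start - 1 - prev
--                     segments.append(f"{g}-{g}")
--                 segments.append(f"{chain}{start}-{end}")
--                 prev = end
--             start = end = r
--     if end is not None:
--         if start > prev + 1:
--             g = start - 1 - prev
--             segments.append(f"{g}-{g}")
--         segments.append(f"{chain}{start}-{end}")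
--         prev = end
--     if prev < total_length:
--         g = total_length - prev
--         segments.append(f"{g}-{g}")
--     return "[" + "/".join(segments) + "]"
-- ===== Notes on version B (the rewrite author's own statement) =====
-- stated objective: alternative
-- what changed: A scans every position 1..total_length testing set membership to grow segments; B sorts the distinct clipped fixed residues, merges them into consecutive runs in one pass over the sorted list, and emits the alternating free/fixed segments directly from the runs, so the loop count depends on the number of fixed residues rather than on total_length (constructing the output string itself can still dominate).
import Mathlib
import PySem

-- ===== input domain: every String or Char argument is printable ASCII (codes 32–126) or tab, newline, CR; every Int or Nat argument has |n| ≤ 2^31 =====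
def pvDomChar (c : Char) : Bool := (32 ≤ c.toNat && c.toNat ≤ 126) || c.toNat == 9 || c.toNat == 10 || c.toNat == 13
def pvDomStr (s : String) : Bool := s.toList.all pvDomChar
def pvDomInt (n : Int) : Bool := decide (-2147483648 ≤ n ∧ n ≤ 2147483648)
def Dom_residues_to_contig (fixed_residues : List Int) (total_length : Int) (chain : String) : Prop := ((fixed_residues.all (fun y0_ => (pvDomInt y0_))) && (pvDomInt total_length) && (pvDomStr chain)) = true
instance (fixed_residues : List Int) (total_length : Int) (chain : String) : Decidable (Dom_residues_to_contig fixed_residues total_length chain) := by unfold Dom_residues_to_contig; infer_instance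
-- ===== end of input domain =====

-- B replaces A's position-by-position scan over 1..total_length by sorting the
-- clipped fixed residues and merging them into consecutive runs, emitting the
-- alternating free/fixed segments directly from the runs (objective: alternative
-- algorithm; the loop count depends on the number of fixed residues, not on
-- total_length, but building the output string itself can dominate).

-- ===== PORT A =====
-- inner while of the fixed branch: 'while j+1 <= total and j+1 in fixed_set: j += 1'
def pvRunFix (fs : PySem.Set Int) (total : Int) (j : Int) : Int :=
  if j + 1 ≤ total ∧ PySem.Set.contains fs (j + 1) = true then pvRunFix fs total (j + 1) else j
termination_by (total - j).toNat
decreasing_by omega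

-- inner while of the free branch: 'while j+1 <= total and j+1 not in fixed_set: j += 1'
def pvRunFree (fs : PySem.Set Int) (total : Int) (j : Int) : Int :=
  if j + 1 ≤ total ∧ ¬ PySem.Set.contains fs (j + 1) = true then pvRunFree fs total (j + 1) else j
termination_by (total - j).toNat
decreasing_by omega

-- the two inner whiles only increase j (cited by pvScanA's termination proof)
theorem le_pvRunFix (fs : PySem.Set Int) (total : Int) : ∀ j, j ≤ pvRunFix fs total j := by
  intro j
  fun_induction pvRunFix fs total j with
  | case1 j h ih => omega
  | case2 j h => omega

theorem le_pvRunFree (fs : PySem.Set Int) (total : Int) : ∀ j, j ≤ pvRunFree fs total j := by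
  intro j
  fun_induction pvRunFree fs total j with
  | case1 j h ih => omega
  | case2 j h => omega

-- the outer 'while i <= total_length' loop, accumulating `segments`
def pvScanA (fs : PySem.Set Int) (total : Int) (chain : String) (i : Int) (segs : List String) : List String :=
  if _h : i ≤ total then
    if PySem.Set.contains fs i = true then
      let j := pvRunFix fs total i
      pvScanA fs total chain (j + 1)
        (segs ++ [chain ++ PySem.Int.toStr i ++ "-" ++ PySem.Int.toStr j])
    else
      let j := pvRunFree fs total i
      pvScanA fs total chain (j + 1)
        (segs ++ [PySem.Int.toStr (j - i + 1) ++ "-" ++ PySem.Int.toStr (j - i + 1)])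
  else segs
termination_by (total + 1 - i).toNat
decreasing_by
  · have := le_pvRunFix fs total i; omega
  · have := le_pvRunFree fs total i; omega

def residues_to_contig (fixed_residues : List Int) (total_length : Int) (chain : String) : String :=
  if fixed_residues = [] then
    "[" ++ PySem.Int.toStr total_length ++ "-" ++ PySem.Int.toStr total_length ++ "]"
  else
    let fs : PySem.Set Int := PySem.Set.ofList fixed_residues
    "[" ++ PySem.Str.join "/" (pvScanA fs total_length chain 1 []) ++ "]"

-- ===== PORT B =====
-- flush the current run (start,end): emit the free gap before it (if any) and the fixed segment
def pvFlushB (chain : String) (segs : List String) (prev s e : Int) : List String :=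
  (if s > prev + 1 then
      segs ++ [PySem.Int.toStr (s - 1 - prev) ++ "-" ++ PySem.Int.toStr (s - 1 - prev)]
    else segs)
  ++ [chain ++ PySem.Int.toStr s ++ "-" ++ PySem.Int.toStr e]

-- one step of B's single pass over the sorted distinct residues; state = (segments, prev, current run)
def pvStepB (chain : String) (st : List String × Int × Option (Int × Int)) (r : Int) :
    List String × Int × Option (Int × Int) :=
  match st with
  | (segs, prev, some (s, e)) =>
      if r = e + 1 then (segs, prev, some (s, r))
      else (pvFlushB chain segs prev s e, e, some (r, r))
  | (segs, prev, none) => (segs, prev, some (r, r))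

-- after the loop: flush the last run, then the trailing free segment
def pvFinishB (chain : String) (total : Int) (st : List String × Int × Option (Int × Int)) :
    List String :=
  let sp : List String × Int :=
    match st with
    | (segs, prev, some (s, e)) => (pvFlushB chain segs prev s e, e)
    | (segs, prev, none) => (segs, prev)
  if sp.2 < total then
    sp.1 ++ [PySem.Int.toStr (total - sp.2) ++ "-" ++ PySem.Int.toStr (total - sp.2)]
  else sp.1

def residues_to_contig_alt (fixed_residues : List Int) (total_length : Int) (chain : String) : String :=
  if fixed_residues = [] then
    "[" ++ PySem.Int.toStr total_length ++ "-" ++ PySem.Int.toStr total_length ++ "]"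
  else
    let rs : List Int :=
      PySem.List.sorted
        (PySem.Set.ofList (fixed_residues.filter (fun r => decide (1 ≤ r ∧ r ≤ total_length))))
        (fun x => x) false
    "[" ++ PySem.Str.join "/"
        (pvFinishB chain total_length (rs.foldl (pvStepB chain) ([], 0, none))) ++ "]"

-- ===== PRECONDITION & SPEC =====
def Spec_residues_to_contig (fixed_residues : List Int) (total_length : Int) (chain : String) (out : String) : Prop := out = residues_to_contig_alt fixed_residues total_length chain
instance (fixed_residues : List Int) (total_length : Int) (chain : String) (out : String) : Decidable (Spec_residues_to_contig fixed_residues total_length chain out) := by unfold Spec_residues_to_contig; infer_instance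

-- ===== CLAIM (what is proved, stated in full; the proofs are below) =====
def Claim_equal_residues_to_contig : Prop := ∀ (fixed_residues : List Int) (total_length : Int) (chain : String), Dom_residues_to_contig fixed_residues total_length chain → Spec_residues_to_contig fixed_residues total_length chain (residues_to_contig fixed_residues total_length chain)

-- ===== LEMMAS AND PROOFS =====

-- characterisation of A's inner fixed-run while loop
theorem pvRunFix_spec (fs : PySem.Set Int) (total : Int) :
    ∀ i, i ≤ total → PySem.Set.contains fs i = true →
      i ≤ pvRunFix fs total i ∧ pvRunFix fs total i ≤ total ∧
      (∀ r, i ≤ r → r ≤ pvRunFix fs total i → PySem.Set.contains fs r = true) ∧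
      (pvRunFix fs total i = total ∨ PySem.Set.contains fs (pvRunFix fs total i + 1) = false) := by
  intro i
  fun_induction pvRunFix fs total i with
  | case1 j h ih =>
      intro _ hj
      have := ih h.1 h.2
      refine ⟨by omega, this.2.1, ?_, this.2.2.2⟩
      intro r h1 h2
      by_cases hr : r = j
      · exact hr ▸ hj
      · exact this.2.2.1 r (by omega) h2
  | case2 j h =>
      intro hle hj
      refine ⟨le_refl _, hle, ?_, ?_⟩
      · intro r h1 h2; have : r = j := le_antisymm h2 h1; exact this ▸ hj
      · rcases Decidable.em (j + 1 ≤ total) with hc | hc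
        · right
          by_cases hm : PySem.Set.contains fs (j + 1) = true
          · exact absurd ⟨hc, hm⟩ h
          · simpa using hm
        · left; omega

-- characterisation of A's inner free-run while loop
theorem pvRunFree_spec (fs : PySem.Set Int) (total : Int) :
    ∀ i, i ≤ total → PySem.Set.contains fs i = false →
      i ≤ pvRunFree fs total i ∧ pvRunFree fs total i ≤ total ∧
      (∀ r, i ≤ r → r ≤ pvRunFree fs total i → PySem.Set.contains fs r = false) ∧
      (pvRunFree fs total i = total ∨ PySem.Set.contains fs (pvRunFree fs total i + 1) = true) := by
  intro i
  fun_induction pvRunFree fs total i with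
  | case1 j h ih =>
      intro _ hj
      have := ih h.1 (by simpa using h.2)
      refine ⟨by omega, this.2.1, ?_, this.2.2.2⟩
      intro r h1 h2
      by_cases hr : r = j
      · exact hr ▸ hj
      · exact this.2.2.1 r (by omega) h2
  | case2 j h =>
      intro hle hj
      refine ⟨le_refl _, hle, ?_, ?_⟩
      · intro r h1 h2; have : r = j := le_antisymm h2 h1; exact this ▸ hj
      · rcases Decidable.em (j + 1 ≤ total) with hc | hc
        · right
          by_cases hm : PySem.Set.contains fs (j + 1) = true
          · exact hm
          · exact absurd ⟨hc, hm⟩ h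
        · left; omega

-- folding B's step over a consecutive range just extends the current run
theorem foldB_consec (chain : String) :
    ∀ (n : Nat) (e j : Int), (j - e).toNat = n → e ≤ j →
      ∀ (segs : List String) (p s : Int),
        (PySem.List.pyRange (e + 1) (j + 1) 1).foldl (pvStepB chain) (segs, p, some (s, e))
          = (segs, p, some (s, j)) := by
  intro n
  induction n with
  | zero =>
      intro e j h1 h2 segs p s
      have hej : e = j := by omega
      subst hej
      rw [PySem.List.pyRange_one_eq_nil (by omega)]
      rfl
  | succ m ih =>
      intro e j h1 h2 segs p s
      by_cases hej : e = j
      · subst hej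
        rw [PySem.List.pyRange_one_eq_nil (by omega)]
        rfl
      · rw [PySem.List.pyRange_one_cons (by omega)]
        rw [List.foldl_cons]
        have hstep : pvStepB chain (segs, p, some (s, e)) (e + 1) = (segs, p, some (s, e + 1)) := by
          simp [pvStepB]
        rw [hstep]
        exact ih (e + 1) j (by omega) (by omega) segs p s

-- an open run whose successor never appears can be flushed eagerly
theorem foldB_detach (chain : String) (total : Int) :
    ∀ (l : List Int) (segs : List String) (p s e : Int), (∀ x ∈ l, e + 1 < x) →
      pvFinishB chain total (l.foldl (pvStepB chain) (segs, p, some (s, e)))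
        = pvFinishB chain total (l.foldl (pvStepB chain) (pvFlushB chain segs p s e, e, none)) := by
  intro l segs p s e hl
  cases l with
  | nil => rfl
  | cons a l' =>
      have ha : a ≠ e + 1 := by have := hl a (by simp); omega
      simp only [List.foldl_cons]
      have h1 : pvStepB chain (segs, p, some (s, e)) a
          = (pvFlushB chain segs p s e, e, some (a, a)) := by
        simp [pvStepB, ha]
      have h2 : pvStepB chain (pvFlushB chain segs p s e, e, none) a
          = (pvFlushB chain segs p s e, e, some (a, a)) := by
        simp [pvStepB]
      rw [h1, h2]

-- the final segments depend on (segs, prev) only through the flushed prefix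
theorem foldB_pref (chain : String) (total : Int) :
    ∀ (l : List Int) (e s p p' : Int) (segs segs' : List String),
      (if s > p + 1 then
          segs ++ [PySem.Int.toStr (s - 1 - p) ++ "-" ++ PySem.Int.toStr (s - 1 - p)]
        else segs)
        = (if s > p' + 1 then
            segs' ++ [PySem.Int.toStr (s - 1 - p') ++ "-" ++ PySem.Int.toStr (s - 1 - p')]
          else segs') →
      pvFinishB chain total (l.foldl (pvStepB chain) (segs, p, some (s, e)))
        = pvFinishB chain total (l.foldl (pvStepB chain) (segs', p', some (s, e))) := by
  intro l
  induction l with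
  | nil =>
      intro e s p p' segs segs' hpref
      simp only [List.foldl_nil, pvFinishB, pvFlushB]
      rw [hpref]
  | cons a l' ih =>
      intro e s p p' segs segs' hpref
      simp only [List.foldl_cons]
      by_cases ha : a = e + 1
      · subst ha
        have h1 : pvStepB chain (segs, p, some (s, e)) (e + 1) = (segs, p, some (s, e + 1)) := by
          simp [pvStepB]
        have h2 : pvStepB chain (segs', p', some (s, e)) (e + 1) = (segs', p', some (s, e + 1)) := by
          simp [pvStepB]
        rw [h1, h2]
        exact ih (e + 1) s p p' segs segs' hpref
      · have h1 : pvStepB chain (segs, p, some (s, e)) a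
            = (pvFlushB chain segs p s e, e, some (a, a)) := by simp [pvStepB, ha]
        have h2 : pvStepB chain (segs', p', some (s, e)) a
            = (pvFlushB chain segs' p' s e, e, some (a, a)) := by simp [pvStepB, ha]
        rw [h1, h2]
        have hfl : pvFlushB chain segs p s e = pvFlushB chain segs' p' s e := by
          unfold pvFlushB; rw [hpref]
        rw [hfl]

-- B's sorted distinct clipped residues are the members of fs in scan order
theorem sorted_clip_eq_filter_range (fixed : List Int) (total : Int) :
    PySem.List.sorted
        (PySem.Set.ofList (fixed.filter (fun r => decide (1 ≤ r ∧ r ≤ total))))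
        (fun x => x) false
      = (PySem.List.pyRange 1 (total + 1) 1).filter
          (fun r => PySem.Set.contains (PySem.Set.ofList fixed) r) := by
  apply PySem.List.sorted_eq_of_perm_of_pairwise_lt
  · rw [List.perm_ext_iff_of_nodup
      (List.Nodup.filter _ (PySem.List.nodup_pyRange_one _ _)) (PySem.Set.nodup_ofList _)]
    intro a
    simp only [List.mem_filter, PySem.List.mem_pyRange_one, PySem.Set.mem_ofList,
      PySem.Set.contains_iff, decide_eq_true_eq]
    constructor
    · rintro ⟨⟨h1, h2⟩, h3⟩; exact ⟨h3, h1, by omega⟩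
    · rintro ⟨h3, h1, h2⟩; exact ⟨⟨h1, by omega⟩, h3⟩
  · exact List.Pairwise.filter _ (PySem.List.pairwise_lt_pyRange_one _ _)

-- the main correspondence: B's fold-and-finish over the residues ≥ i equals A's scan from i
theorem foldB_eq_scanA (fs : PySem.Set Int) (total : Int) (chain : String) :
    ∀ (n : Nat) (i : Int), (total + 1 - i).toNat = n →
      ∀ (segs : List String),
        pvFinishB chain total
            (((PySem.List.pyRange i (total + 1) 1).filter
                (fun r => PySem.Set.contains fs r)).foldl (pvStepB chain) (segs, i - 1, none))
          = pvScanA fs total chain i segs := by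
  intro n
  induction n using Nat.strong_induction_on with
  | _ n IH =>
  intro i hn segs
  rw [pvScanA]
  by_cases hle : i ≤ total
  · rw [dif_pos hle]
    by_cases hm : PySem.Set.contains fs i = true
    · -- fixed branch
      rw [if_pos hm]
      obtain ⟨h1, h2, hall, hend⟩ := pvRunFix_spec fs total i hle hm
      set j := pvRunFix fs total i with hj
      -- split the range at j+1
      rw [PySem.List.pyRange_one_append i (j + 1) (total + 1) (by omega) (by omega),
        List.filter_append, List.foldl_append]
      have hself : (PySem.List.pyRange i (j + 1) 1).filter
          (fun r => PySem.Set.contains fs r) = PySem.List.pyRange i (j + 1) 1 := by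
        apply List.filter_eq_self.mpr
        intro a ha
        rw [PySem.List.mem_pyRange_one] at ha
        exact hall a (by omega) (by omega)
      rw [hself, PySem.List.pyRange_one_cons (show i < j + 1 by omega), List.foldl_cons]
      have hstep0 : pvStepB chain (segs, i - 1, none) i = (segs, i - 1, some (i, i)) := by
        simp [pvStepB]
      rw [hstep0, foldB_consec chain (j - i).toNat i j rfl h1]
      -- the remaining residues are all beyond j+1
      have hgt : ∀ x ∈ (PySem.List.pyRange (j + 1) (total + 1) 1).filter
          (fun r => PySem.Set.contains fs r), j + 1 < x := by
        intro x hx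
        rw [List.mem_filter, PySem.List.mem_pyRange_one] at hx
        rcases hx with ⟨⟨hx1, hx2⟩, hx3⟩
        by_cases hxe : x = j + 1
        · subst hxe
          rcases hend with he | he
          · omega
          · rw [he] at hx3; cases hx3
        · omega
      rw [foldB_detach chain total _ segs (i - 1) i j hgt]
      have hfl : pvFlushB chain segs (i - 1) i j
          = segs ++ [chain ++ PySem.Int.toStr i ++ "-" ++ PySem.Int.toStr j] := by
        unfold pvFlushB
        rw [if_neg (by omega)]
      rw [hfl]
      -- the next filtered range starts with the scan at j+1: prev = j = (j+1) - 1
      have := IH (total + 1 - (j + 1)).toNat (by omega) (j + 1) rfl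
        (segs ++ [chain ++ PySem.Int.toStr i ++ "-" ++ PySem.Int.toStr j])
      rw [show j + 1 - 1 = j by omega] at this
      exact this
    · -- free branch
      rw [if_neg hm]
      have hm' : PySem.Set.contains fs i = false := by simpa using hm
      obtain ⟨h1, h2, hall, hend⟩ := pvRunFree_spec fs total i hle hm'
      set j := pvRunFree fs total i with hj
      rw [PySem.List.pyRange_one_append i (j + 1) (total + 1) (by omega) (by omega),
        List.filter_append, List.foldl_append]
      have hnil : (PySem.List.pyRange i (j + 1) 1).filter
          (fun r => PySem.Set.contains fs r) = [] := by
        apply List.filter_eq_nil_iff.mpr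
        intro a ha
        rw [PySem.List.mem_pyRange_one] at ha
        have h := hall a (by omega) (by omega)
        intro hc
        have hc' : PySem.Set.contains fs a = true := hc
        rw [h] at hc'
        cases hc'
      rw [hnil, List.foldl_nil]
      by_cases hjt : j = total
      · -- trailing free segment: the scan stops after it
        rw [PySem.List.pyRange_one_eq_nil (by omega)]
        simp only [List.filter_nil, List.foldl_nil]
        rw [pvScanA]
        rw [dif_neg (by omega)]
        simp only [pvFinishB]
        rw [if_pos (by omega : i - 1 < total)]
        rw [show total - (i - 1) = j - i + 1 by omega]
      · -- a later fixed run follows at j+1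
        have hj1 : PySem.Set.contains fs (j + 1) = true := by
          rcases hend with he | he
          · omega
          · exact he
        rw [PySem.List.pyRange_one_cons (show j + 1 < total + 1 by omega)]
        rw [List.filter_cons_of_pos (by simpa using hj1), List.foldl_cons]
        have hstep0 : pvStepB chain (segs, i - 1, none) (j + 1)
            = (segs, i - 1, some (j + 1, j + 1)) := by simp [pvStepB]
        rw [hstep0]
        have hpref :
            (if j + 1 > (i - 1) + 1 then
                segs ++ [PySem.Int.toStr (j + 1 - 1 - (i - 1)) ++ "-"
                  ++ PySem.Int.toStr (j + 1 - 1 - (i - 1))]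
              else segs)
            = (if j + 1 > j + 1 then
                (segs ++ [PySem.Int.toStr (j - i + 1) ++ "-" ++ PySem.Int.toStr (j - i + 1)])
                  ++ [PySem.Int.toStr (j + 1 - 1 - j) ++ "-" ++ PySem.Int.toStr (j + 1 - 1 - j)]
              else segs ++ [PySem.Int.toStr (j - i + 1) ++ "-" ++ PySem.Int.toStr (j - i + 1)]) := by
          rw [if_pos (by omega), if_neg (by omega)]
          rw [show j + 1 - 1 - (i - 1) = j - i + 1 by omega]
        rw [foldB_pref chain total _ (j + 1) (j + 1) (i - 1) j segs
          (segs ++ [PySem.Int.toStr (j - i + 1) ++ "-" ++ PySem.Int.toStr (j - i + 1)]) hpref]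
        have hstep1 : pvStepB chain
            (segs ++ [PySem.Int.toStr (j - i + 1) ++ "-" ++ PySem.Int.toStr (j - i + 1)], j, none)
            (j + 1)
            = (segs ++ [PySem.Int.toStr (j - i + 1) ++ "-" ++ PySem.Int.toStr (j - i + 1)], j,
                some (j + 1, j + 1)) := by simp [pvStepB]
        rw [← hstep1, ← List.foldl_cons, ← List.filter_cons_of_pos (p := fun r => PySem.Set.contains fs r) (by simpa using hj1),
          ← PySem.List.pyRange_one_cons (show j + 1 < total + 1 by omega)]
        have := IH (total + 1 - (j + 1)).toNat (by omega) (j + 1) rfl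
          (segs ++ [PySem.Int.toStr (j - i + 1) ++ "-" ++ PySem.Int.toStr (j - i + 1)])
        rw [show j + 1 - 1 = j by omega] at this
        exact this
  · rw [dif_neg hle]
    rw [PySem.List.pyRange_one_eq_nil (by omega)]
    simp only [List.filter_nil, List.foldl_nil, pvFinishB]
    rw [if_neg (by omega)]

-- ===== VERDICT (by name: the statement is the Claim_ definition above) =====
theorem residues_to_contig_spec : Claim_equal_residues_to_contig := by
  intro fixed total chain _dom
  unfold Spec_residues_to_contig residues_to_contig residues_to_contig_alt
  by_cases h : fixed = []
  · simp [h]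
  · simp only [h]
    rw [sorted_clip_eq_filter_range]
    have := foldB_eq_scanA (PySem.Set.ofList fixed) total chain (total + 1 - 1).toNat 1 rfl []
    simp only [show (1 : Int) - 1 = 0 from rfl] at this
    rw [this]
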